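-- pv_equiv track=rewrite | github.com/wan-catherine/Leetcode | problems/N255_Verify_Preorder_Sequence_In_Binary_Search_Tree.py | verifyPreorder_TLE
-- ===== SOURCE A (Python) =====
-- def verifyPreorder_TLE(preorder):
--     """
--     :type preorder: List[int]
--     :rtype: bool
--     """
--     def dfs(start, end):
--         if start >= end:
--             return True
--         root = preorder[start]
--         index = start+1
--         while index <= end and preorder[index] < root:
--             index += 1
--         for i in range(index, end+1):
--             if preorder[i] < root:
--                 return False
--         return dfs(start+1, index-1) and dfs(index, end)
--     return dfs(0, len(preorder)-1)
-- ===== SOURCE B (Python) =====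
-- def verifyPreorder_TLE(preorder):
--     """
--     :type preorder: List[int]
--     :rtype: bool
--     """
--     stack = []
--     low = None
--     for x in preorder:
--         if low is not None and x < low:
--             return False
--         while stack and stack[-1] <= x:
--             low = stack.pop()
--         stack.append(x)
--     return True
-- ===== Notes on version B (the rewrite author's own statement) =====
-- stated objective: faster
-- what changed: Replaced A's O(n^2) recursive divide-and-scan (for each subtree, a linear scan to find the split point plus another scan to validate the right part) by a single left-to-right pass keeping a stack of open ancestors and a running lower bound (monotone-stack algorithm).
import Mathlib
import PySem

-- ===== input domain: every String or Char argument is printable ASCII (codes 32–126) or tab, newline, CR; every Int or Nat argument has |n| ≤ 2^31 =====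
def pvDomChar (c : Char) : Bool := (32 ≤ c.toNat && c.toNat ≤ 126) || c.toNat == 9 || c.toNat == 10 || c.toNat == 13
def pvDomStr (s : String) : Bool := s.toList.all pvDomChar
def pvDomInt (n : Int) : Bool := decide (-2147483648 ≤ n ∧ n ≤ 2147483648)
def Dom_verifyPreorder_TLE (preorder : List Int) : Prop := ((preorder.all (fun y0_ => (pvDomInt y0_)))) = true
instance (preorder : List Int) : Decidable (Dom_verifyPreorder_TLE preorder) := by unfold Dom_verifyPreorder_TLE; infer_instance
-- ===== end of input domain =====

-- B replaces A's O(n^2) recursive scan-and-split with a single O(n) pass over the list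
-- maintaining a stack of open ancestors and a running lower bound.

-- ===== PORT A =====
-- The three loops/recursions below are transcribed with an explicit structural fuel equal to the
-- exact termination measure of the Python code (so the fuel never runs out and changes nothing).
-- A's inner `while index <= end and preorder[index] < root: index += 1`
def dfsWhileIdxF (fuel : Nat) (xs : List Int) (root endI index : Int) : Int :=
  match fuel with
  | 0 => index
  | fuel + 1 =>
    if index ≤ endI ∧ PySem.List.pyGetD xs index 0 < root then
      dfsWhileIdxF fuel xs root endI (index + 1)
    else index

def dfsWhileIdx (xs : List Int) (root endI index : Int) : Int :=
  dfsWhileIdxF (endI + 1 - index).toNat xs root endI index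

-- A's `for i in range(index, end+1): if preorder[i] < root: return False` / final `return True`
def dfsForOkF (fuel : Nat) (xs : List Int) (root i endI : Int) : Bool :=
  match fuel with
  | 0 => true
  | fuel + 1 =>
    if i ≤ endI then
      if PySem.List.pyGetD xs i 0 < root then false else dfsForOkF fuel xs root (i + 1) endI
    else true

def dfsForOk (xs : List Int) (root i endI : Int) : Bool :=
  dfsForOkF (endI + 1 - i).toNat xs root i endI

-- A's `dfs(start, end)` (fuel = A's recursion depth measure end+1-start)
def dfsAF (fuel : Nat) (xs : List Int) (start endI : Int) : Bool :=
  match fuel with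
  | 0 => true
  | fuel + 1 =>
    if start ≥ endI then true
    else
      let root := PySem.List.pyGetD xs start 0
      let index := dfsWhileIdx xs root endI (start + 1)
      if dfsForOk xs root index endI then
        dfsAF fuel xs (start + 1) (index - 1) && dfsAF fuel xs index endI
      else false

def dfsA (xs : List Int) (start endI : Int) : Bool :=
  dfsAF (endI + 1 - start).toNat xs start endI

def verifyPreorder_TLE (preorder : List Int) : Bool :=
  dfsA preorder 0 ((preorder.length : Int) - 1)

-- ===== PORT B =====
-- B's `if low is not None and x < low`
def ltLow (x : Int) (low : Option Int) : Bool :=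
  match low with
  | none => false
  | some l => x < l

-- B's `while stack and stack[-1] <= x: low = stack.pop()` (stack top is the list head)
def popLoop (stack : List Int) (x : Int) (low : Option Int) : List Int × Option Int :=
  match stack with
  | [] => ([], low)
  | t :: rest => if t ≤ x then popLoop rest x (some t) else (t :: rest, low)

-- B's `for x in preorder: …`; state = (stack, low)
def goB (ys : List Int) (stack : List Int) (low : Option Int) : Bool :=
  match ys with
  | [] => true
  | x :: rest =>
    if ltLow x low then false
    else
      let p := popLoop stack x low
      goB rest (x :: p.1) p.2

def verifyPreorder_TLE_alt (preorder : List Int) : Bool :=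
  goB preorder [] none

-- ===== PRECONDITION & SPEC =====
def Spec_verifyPreorder_TLE (preorder : List Int) (out : Bool) : Prop := out = verifyPreorder_TLE_alt preorder
instance (preorder : List Int) (out : Bool) : Decidable (Spec_verifyPreorder_TLE preorder out) := by unfold Spec_verifyPreorder_TLE; infer_instance

-- ===== CLAIM (what is proved, stated in full; the proofs are below) =====
def Claim_equal_verifyPreorder_TLE : Prop := ∀ (preorder : List Int), Dom_verifyPreorder_TLE preorder → Spec_verifyPreorder_TLE preorder (verifyPreorder_TLE preorder)

-- ===== LEMMAS AND PROOFS =====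

-- `okLow low x` = "x does not violate the lower bound low"
def okLow (low : Option Int) (x : Int) : Bool :=
  match low with
  | none => true
  | some l => l ≤ x

-- common reference point: the recursive "split at first element ≥ root" validity check
def validL : List Int → Bool
  | [] => true
  | r :: t =>
    ((t.dropWhile (fun a => a < r)).all (fun a => r ≤ a))
      && validL (t.takeWhile (fun a => a < r))
      && validL (t.dropWhile (fun a => a < r))
termination_by l => l.length
decreasing_by
  · have := (List.takeWhile_sublist (l := t) (p := fun a => a < r)).length_le
    simpa using by omega
  · have := List.length_dropWhile_le (fun a => a < r) t
    simpa using by omega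

def okSeg (seg : List Int) (low : Option Int) : Bool :=
  validL seg && seg.all (okLow low)

-- chain ys low [s1,…,sk]: split ys at the (increasing) open ancestor bounds s1 < … < sk,
-- each block a valid tree above its own lower bound
def chain (ys : List Int) (low : Option Int) (st : List Int) : Bool :=
  match st with
  | [] => okSeg ys low
  | s :: st' =>
    okSeg (ys.takeWhile (fun a => a < s)) low
      && chain (ys.dropWhile (fun a => a < s)) (some s) st'

theorem chain_nil_ys (low : Option Int) (st : List Int) : chain [] low st = true := by
  induction st generalizing low with
  | nil => simp [chain, okSeg, validL]
  | cons s st ih => simp [chain, okSeg, validL, ih]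

theorem ltLow_eq (x : Int) (low : Option Int) : ltLow x low = !okLow low x := by
  cases low with
  | none => rfl
  | some l =>
    by_cases h : x < l
    · have h2 : ¬ l ≤ x := by omega
      simp [ltLow, okLow, h, h2]
    · have h2 : l ≤ x := by omega
      simp [ltLow, okLow, h, h2]

theorem okLow_some_false (l x : Int) (h : x < l) : okLow (some l) x = false := by
  simp [okLow]; omega

theorem chain_head_lt_low (st : List Int) (l x : Int) (rest : List Int)
    (hx : x < l) (hst : ∀ s ∈ st, l ≤ s) :
    chain (x :: rest) (some l) st = false := by
  cases st with
  | nil => simp [chain, okSeg, List.all_cons, okLow_some_false l x hx]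
  | cons s st' =>
    have hxs : x < s := lt_of_lt_of_le hx (hst s (by simp))
    simp [chain, List.takeWhile_cons, hxs, okSeg, List.all_cons, okLow_some_false l x hx]

theorem takeWhile_takeWhile_lt (x s : Int) (hxs : x < s) (ys : List Int) :
    (ys.takeWhile (fun a => a < s)).takeWhile (fun a => a < x)
      = ys.takeWhile (fun a => a < x) := by
  induction ys with
  | nil => simp
  | cons y ys ih =>
    by_cases hy : y < x
    · have hys : y < s := by omega
      simp [List.takeWhile_cons, hy, hys, ih]
    · by_cases hys : y < s
      · simp [List.takeWhile_cons, hy, hys]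
      · simp [List.takeWhile_cons, hy, hys]

theorem takeWhile_dropWhile_lt (x s : Int) (hxs : x < s) (ys : List Int) :
    (ys.dropWhile (fun a => a < x)).takeWhile (fun a => a < s)
      = (ys.takeWhile (fun a => a < s)).dropWhile (fun a => a < x) := by
  induction ys with
  | nil => simp
  | cons y ys ih =>
    by_cases hy : y < x
    · have hys : y < s := by omega
      simp [List.dropWhile_cons, List.takeWhile_cons, hy, hys, ih]
    · by_cases hys : y < s
      · simp [List.dropWhile_cons, List.takeWhile_cons, hy, hys]
      · simp [List.dropWhile_cons, List.takeWhile_cons, hy, hys]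

theorem dropWhile_dropWhile_lt (x s : Int) (hxs : x < s) (ys : List Int) :
    (ys.dropWhile (fun a => a < x)).dropWhile (fun a => a < s)
      = ys.dropWhile (fun a => a < s) := by
  induction ys with
  | nil => simp
  | cons y ys ih =>
    by_cases hy : y < x
    · have hys : y < s := by omega
      simp [List.dropWhile_cons, hy, hys, ih]
    · simp [List.dropWhile_cons, hy]

theorem okSeg_cons (x : Int) (t : List Int) (low : Option Int) (hx : okLow low x = true) :
    okSeg (x :: t) low
      = (okSeg (t.takeWhile (fun a => a < x)) low
          && okSeg (t.dropWhile (fun a => a < x)) (some x)) := by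
  have hsplit : t.all (okLow low)
      = ((t.takeWhile (fun a => a < x)).all (okLow low)
          && (t.dropWhile (fun a => a < x)).all (okLow low)) := by
    conv_lhs => rw [← List.takeWhile_append_dropWhile (p := fun a => a < x) (l := t)]
    exact List.all_append
  have himp : (t.dropWhile (fun a => a < x)).all (fun a => x ≤ a) = true →
      (t.dropWhile (fun a => a < x)).all (okLow low) = true := by
    intro h
    rw [List.all_eq_true] at h ⊢
    intro a ha
    cases low with
    | none => rfl
    | some l =>
      have h1 := h a ha
      simp [okLow] at hx ⊢
      simp at h1
      omega
  have hdw : okLow (some x) = fun a => decide (x ≤ a) := rfl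
  simp only [okSeg, validL, List.all_cons, hx, Bool.true_and, hsplit, hdw]
  rw [Bool.eq_iff_iff]
  simp only [Bool.and_eq_true]
  constructor
  · rintro ⟨⟨⟨hall, htwv⟩, hdwv⟩, htwl, hdwl⟩
    exact ⟨⟨htwv, htwl⟩, hdwv, hall⟩
  · rintro ⟨⟨htwv, htwl⟩, hdwv, hall⟩
    exact ⟨⟨⟨hall, htwv⟩, hdwv⟩, htwl, himp hall⟩

theorem okSeg_nil (low : Option Int) : okSeg [] low = true := by
  simp [okSeg, validL]

theorem chain_step (ys : List Int) (x : Int) (low : Option Int) (st : List Int)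
    (hx : okLow low x = true) (hst : ∀ s ∈ st, x < s) :
    chain (x :: ys) low st = chain ys low (x :: st) := by
  cases st with
  | nil =>
    show okSeg (x :: ys) low = _
    rw [okSeg_cons x ys low hx]
    simp [chain]
  | cons s st'' =>
    have hxs : x < s := hst s (by simp)
    show (okSeg ((x :: ys).takeWhile (fun a => a < s)) low
        && chain ((x :: ys).dropWhile (fun a => a < s)) (some s) st'') = _
    rw [List.takeWhile_cons_of_pos (by simpa using hxs),
        List.dropWhile_cons_of_pos (by simpa using hxs)]
    rw [okSeg_cons x (ys.takeWhile (fun a => a < s)) low hx]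
    rw [takeWhile_takeWhile_lt x s hxs ys]
    rw [← takeWhile_dropWhile_lt x s hxs ys]
    show _ = (okSeg (ys.takeWhile (fun a => a < x)) low
        && (okSeg ((ys.dropWhile (fun a => a < x)).takeWhile (fun a => a < s)) (some x)
            && chain ((ys.dropWhile (fun a => a < x)).dropWhile (fun a => a < s)) (some s) st''))
    rw [dropWhile_dropWhile_lt x s hxs ys]
    rw [Bool.and_assoc]

theorem popLoop_chain (st : List Int) (x : Int) (low : Option Int)
    (hp : List.Pairwise (· < ·) st) (hlo : ∀ s ∈ st, okLow low s = true)
    (hx : okLow low x = true) :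
    (∀ ys, chain (x :: ys) low st = chain (x :: ys) (popLoop st x low).2 (popLoop st x low).1)
      ∧ (∀ s ∈ (popLoop st x low).1, x < s)
      ∧ okLow (popLoop st x low).2 x = true
      ∧ List.Pairwise (· < ·) (popLoop st x low).1
      ∧ (∀ s ∈ (popLoop st x low).1, okLow (popLoop st x low).2 s = true) := by
  induction st generalizing low with
  | nil =>
    refine ⟨fun ys => rfl, by simp [popLoop], hx, by simp [popLoop], by simp [popLoop]⟩
  | cons s st'' ih =>
    rw [List.pairwise_cons] at hp
    by_cases hsx : s ≤ x
    · have hres : popLoop (s :: st'') x low = popLoop st'' x (some s) := by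
        simp [popLoop, hsx]
      have hlo' : ∀ s' ∈ st'', okLow (some s) s' = true := by
        intro s' hs'
        have := hp.1 s' hs'
        simp [okLow]; omega
      have hx' : okLow (some s) x = true := by simp [okLow]; omega
      obtain ⟨c1, c2, c3, c4, c5⟩ := ih _ hp.2 hlo' hx'
      rw [hres]
      refine ⟨fun ys => ?_, c2, c3, c4, c5⟩
      have hnxs : ¬ x < s := by omega
      calc chain (x :: ys) low (s :: st'')
          = (okSeg ((x :: ys).takeWhile (fun a => a < s)) low
              && chain ((x :: ys).dropWhile (fun a => a < s)) (some s) st'') := rfl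
        _ = chain (x :: ys) (some s) st'' := by
            rw [List.takeWhile_cons_of_neg (by simpa using hnxs),
                List.dropWhile_cons_of_neg (by simpa using hnxs), okSeg_nil]
            simp
        _ = _ := c1 ys
    · have hres : popLoop (s :: st'') x low = (s :: st'', low) := by
        simp [popLoop, hsx]
      rw [hres]
      refine ⟨fun ys => rfl, ?_, hx, List.pairwise_cons.mpr hp, hlo⟩
      intro s' hs'
      rcases List.mem_cons.mp hs' with h | h
      · omega
      · have := hp.1 s' h; omega

theorem goB_chain (ys : List Int) (st : List Int) (low : Option Int)
    (hp : List.Pairwise (· < ·) st) (hlo : ∀ s ∈ st, okLow low s = true) :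
    goB ys st low = chain ys low st := by
  induction ys generalizing st low with
  | nil => simp [goB, chain_nil_ys]
  | cons x rest ih =>
    by_cases hlt : ltLow x low = true
    · cases low with
      | none => simp [ltLow] at hlt
      | some l =>
        have hxl : x < l := by simpa [ltLow] using hlt
        have hst : ∀ s ∈ st, l ≤ s := by
          intro s hs
          have := hlo s hs
          simpa [okLow] using this
        simp [goB, hlt, chain_head_lt_low st l x rest hxl hst]
    · have hx : okLow low x = true := by
        rw [ltLow_eq] at hlt
        simpa using hlt
      obtain ⟨c1, c2, c3, c4, c5⟩ := popLoop_chain st x low hp hlo hx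
      have hpair : List.Pairwise (· < ·) (x :: (popLoop st x low).1) :=
        List.pairwise_cons.mpr ⟨c2, c4⟩
      have hlo' : ∀ s ∈ x :: (popLoop st x low).1, okLow (popLoop st x low).2 s = true := by
        intro s hs
        rcases List.mem_cons.mp hs with h | h
        · rw [h]; exact c3
        · exact c5 s h
      have hgob : goB (x :: rest) st low = goB rest (x :: (popLoop st x low).1) (popLoop st x low).2 := by
        simp [goB, hlt]
      rw [hgob, ih _ _ hpair hlo', ← chain_step rest x _ _ c3 c2, ← c1 rest]

theorem alt_eq_validL (xs : List Int) : verifyPreorder_TLE_alt xs = validL xs := by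
  show goB xs [] none = validL xs
  rw [goB_chain xs [] none (by simp) (by simp)]
  simp [chain, okSeg, okLow]

-- ===== A-side =====

-- the segment preorder[a..b] (both ends inclusive, Int indices)
def seg (xs : List Int) (a b : Int) : List Int :=
  (xs.take (b + 1).toNat).drop a.toNat

theorem seg_nil (xs : List Int) (a b : Int) (h : b + 1 ≤ a) (ha : 0 ≤ a) : seg xs a b = [] := by
  have hlen : (xs.take (b + 1).toNat).length ≤ a.toNat := by
    simp [List.length_take]; omega
  simpa [seg] using List.drop_eq_nil_of_le hlen

theorem seg_cons (xs : List Int) (a b : Int) (ha : 0 ≤ a) (hab : a ≤ b) (hb : b < (xs.length : Int)) :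
    seg xs a b = PySem.List.pyGetD xs a 0 :: seg xs (a + 1) b := by
  have hlt : a.toNat < (xs.take (b + 1).toNat).length := by
    simp [List.length_take]; omega
  show (xs.take (b + 1).toNat).drop a.toNat = _
  rw [List.drop_eq_getElem_cons hlt]
  congr 1
  · rw [List.getElem_take]
    rw [PySem.List.pyGetD_eq_getElem xs 0 ha (by omega)]
  · show _ = (xs.take (b + 1).toNat).drop (a + 1).toNat
    congr 1
    omega

theorem seg_take (xs : List Int) (a b : Int) (k : Nat) (ha : 0 ≤ a) (h : a + k ≤ b + 1) :
    (seg xs a b).take k = seg xs a (a + k - 1) := by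
  show ((xs.take (b + 1).toNat).drop a.toNat).take k = (xs.take (a + k - 1 + 1).toNat).drop a.toNat
  rw [List.drop_take, List.drop_take, List.take_take]
  congr 1
  omega

theorem seg_drop (xs : List Int) (a b : Int) (k : Nat) (ha : 0 ≤ a) :
    (seg xs a b).drop k = seg xs (a + k) b := by
  show ((xs.take (b + 1).toNat).drop a.toNat).drop k = (xs.take (b + 1).toNat).drop (a + k).toNat
  rw [List.drop_drop]
  congr 1
  omega

theorem seg_length (xs : List Int) (a b : Int) (ha : 0 ≤ a) (hb : b < (xs.length : Int)) (hab : a ≤ b + 1) :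
    ((seg xs a b).length : Int) = b + 1 - a := by
  simp [seg, List.length_take]
  omega

theorem whileF_spec (xs : List Int) (root e : Int) (he : e < (xs.length : Int)) :
    ∀ f i, (e + 1 - i).toNat ≤ f → 0 ≤ i → i ≤ e + 1 →
      dfsWhileIdxF f xs root e i = i + (((seg xs i e).takeWhile (fun a => a < root)).length : Int) := by
  intro f
  induction f with
  | zero =>
    intro i hf h0 h1
    have : i = e + 1 := by omega
    rw [dfsWhileIdxF, seg_nil xs i e (by omega) h0]
    simp
  | succ f ih =>
    intro i hf h0 h1
    rw [dfsWhileIdxF]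
    split_ifs with h
    · have hseg : seg xs i e = PySem.List.pyGetD xs i 0 :: seg xs (i + 1) e :=
        seg_cons xs i e h0 h.1 he
      rw [ih (i + 1) (by omega) (by omega) (by omega)]
      rw [hseg, List.takeWhile_cons_of_pos (by simpa using h.2)]
      simp only [List.length_cons]
      push_cast
      ring
    · by_cases hie : i ≤ e
      · have hroot : ¬ (PySem.List.pyGetD xs i 0 < root) := fun hr => h ⟨hie, hr⟩
        rw [seg_cons xs i e h0 hie he, List.takeWhile_cons_of_neg (by simpa using hroot)]
        simp
      · rw [seg_nil xs i e (by omega) h0]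
        simp

theorem while_spec (xs : List Int) (root e : Int) (he : e < (xs.length : Int)) :
    ∀ i, 0 ≤ i → i ≤ e + 1 →
      dfsWhileIdx xs root e i = i + (((seg xs i e).takeWhile (fun a => a < root)).length : Int) := by
  intro i h0 h1
  exact whileF_spec xs root e he _ i le_rfl h0 h1

theorem dfsWhileIdx_ge (xs : List Int) (root endI : Int) :
    ∀ f index, index ≤ dfsWhileIdxF f xs root endI index := by
  intro f
  induction f with
  | zero => intro index; rw [dfsWhileIdxF]
  | succ f ih =>
    intro index
    rw [dfsWhileIdxF]
    split_ifs with h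
    · have := ih (index + 1); omega
    · omega

theorem dfsWhileIdx_le (xs : List Int) (root endI : Int) :
    ∀ f index, index ≤ endI + 1 → dfsWhileIdxF f xs root endI index ≤ endI + 1 := by
  intro f
  induction f with
  | zero => intro index h; rw [dfsWhileIdxF]; omega
  | succ f ih =>
    intro index h
    rw [dfsWhileIdxF]
    split_ifs with hc
    · exact ih (index + 1) (by omega)
    · omega

theorem forF_spec (xs : List Int) (root e : Int) (he : e < (xs.length : Int)) :
    ∀ f i, (e + 1 - i).toNat ≤ f → 0 ≤ i →
      dfsForOkF f xs root i e = (seg xs i e).all (fun a => root ≤ a) := by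
  intro f
  induction f with
  | zero =>
    intro i hf h0
    rw [dfsForOkF, seg_nil xs i e (by omega) h0]
    simp
  | succ f ih =>
    intro i hf h0
    rw [dfsForOkF]
    split_ifs with h h2
    · have hn2 : ¬ (root ≤ PySem.List.pyGetD xs i 0) := by omega
      rw [seg_cons xs i e h0 h he]
      simp [hn2]
    · have hy : root ≤ PySem.List.pyGetD xs i 0 := by omega
      rw [seg_cons xs i e h0 h he, List.all_cons, ih (i + 1) (by omega) (by omega)]
      simp [hy]
    · rw [seg_nil xs i e (by omega) h0]
      simp

theorem for_spec (xs : List Int) (root e : Int) (he : e < (xs.length : Int)) :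
    ∀ i, 0 ≤ i →
      dfsForOk xs root i e = (seg xs i e).all (fun a => root ≤ a) := by
  intro i h0
  exact forF_spec xs root e he _ i le_rfl h0

theorem dropWhile_eq_drop_length_takeWhile (p : Int → Bool) (l : List Int) :
    l.dropWhile p = l.drop (l.takeWhile p).length := by
  conv_rhs => rw [← List.takeWhile_append_dropWhile (p := p) (l := l)]
  rw [List.drop_append]
  simp

theorem dfsAF_eq_validL (xs : List Int) :
    ∀ f s e, (e + 1 - s).toNat ≤ f → 0 ≤ s → e < (xs.length : Int) →
      dfsAF f xs s e = validL (seg xs s e) := by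
  intro f
  induction f with
  | zero =>
    intro s e hf h0 he
    rw [dfsAF, seg_nil xs s e (by omega) h0]
    simp [validL]
  | succ f ih =>
    intro s e hf h0 he
    rw [dfsAF]
    by_cases hse : s ≥ e
    · rw [if_pos hse]
      by_cases h1 : e + 1 ≤ s
      · rw [seg_nil xs s e h1 h0]
        simp [validL]
      · have hseg : seg xs s e = [PySem.List.pyGetD xs s 0] := by
          rw [seg_cons xs s e h0 (by omega) he, seg_nil xs (s + 1) e (by omega) (by omega)]
        rw [hseg]
        simp [validL]
    · rw [if_neg hse]
      show (if dfsForOk xs (PySem.List.pyGetD xs s 0)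
                (dfsWhileIdx xs (PySem.List.pyGetD xs s 0) e (s + 1)) e then
              dfsAF f xs (s + 1) (dfsWhileIdx xs (PySem.List.pyGetD xs s 0) e (s + 1) - 1)
                && dfsAF f xs (dfsWhileIdx xs (PySem.List.pyGetD xs s 0) e (s + 1)) e
            else false) = _
      set root := PySem.List.pyGetD xs s 0 with hroot
      set j := dfsWhileIdx xs root e (s + 1) with hj
      set t := seg xs (s + 1) e with ht
      set tw := t.takeWhile (fun a => a < root) with htw
      have hjge : s + 1 ≤ j := by
        rw [hj, dfsWhileIdx]
        exact dfsWhileIdx_ge xs root e _ (s + 1)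
      have hjle : j ≤ e + 1 := by
        rw [hj, dfsWhileIdx]
        exact dfsWhileIdx_le xs root e _ (s + 1) (by omega)
      have hws : j = s + 1 + ((tw.length : Nat) : Int) := by
        rw [hj, htw, ht]
        exact while_spec xs root e he (s + 1) (by omega) (by omega)
      have hsegC : seg xs s e = root :: t := by
        rw [ht, hroot]
        exact seg_cons xs s e h0 (by omega) he
      have hlt : ((t.length) : Int) = e - s := by
        have := seg_length xs (s + 1) e (by omega) he (by omega)
        rw [← ht] at this
        omega
      have hltw : tw.length ≤ t.length := (List.takeWhile_sublist _).length_le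
      have htw_eq : tw = seg xs (s + 1) (j - 1) := by
        have h1 : tw = t.take tw.length := List.prefix_iff_eq_take.mp (List.takeWhile_prefix _)
        rw [h1, ht, seg_take xs (s + 1) e tw.length (by omega) (by omega)]
        congr 1
        omega
      have hdw_eq : t.dropWhile (fun a => a < root) = seg xs j e := by
        rw [dropWhile_eq_drop_length_takeWhile, ← htw, ht,
          seg_drop xs (s + 1) e tw.length (by omega)]
        congr 1
        omega
      have hforEq : dfsForOk xs root j e = (seg xs j e).all (fun a => root ≤ a) :=
        for_spec xs root e he j (by omega)
      have hIH1 : dfsAF f xs (s + 1) (j - 1) = validL (seg xs (s + 1) (j - 1)) :=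
        ih (s + 1) (j - 1) (by omega) (by omega) (by omega)
      have hIH2 : dfsAF f xs j e = validL (seg xs j e) :=
        ih j e (by omega) (by omega) he
      rw [hforEq, hIH1, hIH2, hsegC]
      show _ = validL (root :: t)
      rw [show validL (root :: t)
            = ((t.dropWhile (fun a => a < root)).all (fun a => root ≤ a)
                && validL (t.takeWhile (fun a => a < root))
                && validL (t.dropWhile (fun a => a < root))) from by simp [validL]]
      rw [hdw_eq, ← htw, htw_eq]
      cases b1 : (seg xs j e).all (fun a => root ≤ a)
      · simp
      · simp

theorem a_eq_validL (xs : List Int) : verifyPreorder_TLE xs = validL xs := by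
  have hseg : seg xs 0 ((xs.length : Int) - 1) = xs := by
    show (xs.take ((xs.length : Int) - 1 + 1).toNat).drop (0 : Int).toNat = xs
    have h1 : ((xs.length : Int) - 1 + 1).toNat = xs.length := by omega
    rw [h1]
    simp
  show dfsAF ((((xs.length : Int) - 1) + 1 - 0).toNat) xs 0 ((xs.length : Int) - 1) = validL xs
  rw [dfsAF_eq_validL xs _ 0 ((xs.length : Int) - 1) le_rfl (by omega) (by omega), hseg]

-- ===== VERDICT (by name: the statement is the Claim_ definition above) =====
theorem verifyPreorder_TLE_spec : Claim_equal_verifyPreorder_TLE := by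
  intro preorder _
  unfold Spec_verifyPreorder_TLE
  rw [a_eq_validL, alt_eq_validL]
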